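-- pv_equiv track=rewrite | github.com/krishnapandey1104/Medical-Ai-Assistant | backend/tools/symptom_checker.py | get_overall_severity
-- ===== SOURCE A (Python) =====
-- SYMPTOMS_DB = {
--     "fever": {
--         "aliases": ["high temperature", "temperature", "feverish"],
--         "causes": ["viral infection", "bacterial infection", "inflammation"],
--         "severity": "mild"
--     },
--     "fatigue": {
--         "aliases": ["tired", "weakness", "low energy", "exhausted"],
--         "causes": ["poor sleep", "stress", "anemia", "thyroid imbalance"],
--         "severity": "mild"
--     },
--     "headache": {
--         "aliases": ["head pain", "migraine", "pressure in head"],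
--         "causes": ["stress", "migraine", "dehydration"],
--         "severity": "mild"
--     },
--     "chest pain": {
--         "aliases": ["chest discomfort", "pressure in chest", "tight chest"],
--         "causes": ["heart-related issue", "muscle strain", "acid reflux"],
--         "severity": "severe"
--     },
--     "breathing difficulty": {
--         "aliases": ["shortness of breath", "difficulty breathing", "dyspnea"],
--         "causes": ["asthma", "lung infection", "allergy"],
--         "severity": "severe"
--     }
-- }
--
-- def normalize(text: str):
--     return text.lower().strip()
--
-- def match_phrase(text, phrase):
--     return phrase in text or any(word in text for word in phrase.split())
--
-- def detect_symptoms(text: str):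
--
--     text = normalize(text)
--     detected = []
--
--     for symptom, data in SYMPTOMS_DB.items():
--
--         # check main symptom
--         if match_phrase(text, symptom):
--             detected.append(symptom)
--             continue
--
--         # check aliases
--         for alias in data["aliases"]:
--             if match_phrase(text, alias):
--                 detected.append(symptom)
--                 break
--
--     return list(set(detected))
--
-- def get_overall_severity(text: str):
--
--     detected = detect_symptoms(text)
--
--     if not detected:
--         return "unknown"
--
--     if any(SYMPTOMS_DB[s]["severity"] == "severe" for s in detected):
--         return "severe"
--
--     if len(detected) >= 2:
--         return "moderate"
--
--     return "mild"
-- ===== SOURCE B (Python) =====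
-- # B: detection via a precomputed inverted keyword index (keyword -> set of symptoms),
-- # built once by flattening every phrase into its words; classification then reads a
-- # precomputed severe-symptom set.  Correct because for every DB phrase, "phrase in text"
-- # already implies each of its words is in text, so A's match test reduces to "some
-- # keyword of the symptom is a substring of the normalized text".
-- SYMPTOMS_DB = {
--     "fever": {
--         "aliases": ["high temperature", "temperature", "feverish"],
--         "causes": ["viral infection", "bacterial infection", "inflammation"],
--         "severity": "mild"
--     },
--     "fatigue": {
--         "aliases": ["tired", "weakness", "low energy", "exhausted"],
--         "causes": ["poor sleep", "stress", "anemia", "thyroid imbalance"],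
--         "severity": "mild"
--     },
--     "headache": {
--         "aliases": ["head pain", "migraine", "pressure in head"],
--         "causes": ["stress", "migraine", "dehydration"],
--         "severity": "mild"
--     },
--     "chest pain": {
--         "aliases": ["chest discomfort", "pressure in chest", "tight chest"],
--         "causes": ["heart-related issue", "muscle strain", "acid reflux"],
--         "severity": "severe"
--     },
--     "breathing difficulty": {
--         "aliases": ["shortness of breath", "difficulty breathing", "dyspnea"],
--         "causes": ["asthma", "lung infection", "allergy"],
--         "severity": "severe"
--     }
-- }
--
-- def _build_index():
--     idx = {}
--     for symptom, data in SYMPTOMS_DB.items():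
--         for phrase in [symptom, *data["aliases"]]:
--             for word in phrase.split():
--                 idx[word] = idx.get(word, set()) | {symptom}
--     return idx
--
-- KEYWORD_INDEX = _build_index()
-- SEVERE_SYMPTOMS = {s for s, d in SYMPTOMS_DB.items() if d["severity"] == "severe"}
--
-- def get_overall_severity(text: str):
--     t = text.lower().strip()
--     matched = set()
--     for word, symptoms in KEYWORD_INDEX.items():
--         if word in t:
--             matched |= symptoms
--     if not matched:
--         return "unknown"
--     if matched & SEVERE_SYMPTOMS:
--         return "severe"
--     return "moderate" if len(matched) >= 2 else "mild"
-- ===== Notes on version B (the rewrite author's own statement) =====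
-- stated objective: alternative
-- what changed: B precomputes an inverted keyword index (word -> set of symptoms, built once by flattening every phrase into its words) and a severe-symptom set; at query time it scans the 25 distinct keywords once, unions the symptom sets of the keywords found in the text, and classifies from that set - correct because a phrase being a substring of the text already implies each of its words is, so A's phrase-or-word test collapses to a pure keyword test.
import Mathlib
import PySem

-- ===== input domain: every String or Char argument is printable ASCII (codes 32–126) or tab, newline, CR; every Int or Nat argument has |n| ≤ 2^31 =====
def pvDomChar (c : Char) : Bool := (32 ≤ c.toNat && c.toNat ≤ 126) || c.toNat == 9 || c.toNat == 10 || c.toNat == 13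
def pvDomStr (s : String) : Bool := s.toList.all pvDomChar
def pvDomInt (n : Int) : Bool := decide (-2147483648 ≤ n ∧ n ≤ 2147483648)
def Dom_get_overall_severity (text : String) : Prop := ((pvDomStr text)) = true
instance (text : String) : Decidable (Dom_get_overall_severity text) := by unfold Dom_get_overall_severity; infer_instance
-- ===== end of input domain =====

-- B replaces A's per-symptom phrase/alias scan by a precomputed inverted keyword index
-- (keyword -> set of symptoms) plus a precomputed severe-symptom set; same return value.

-- ===== PORT A =====
-- SYMPTOMS_DB as (symptom, aliases, severity); "causes" is never read by these functions.
def pvDB : List (String × List String × String) :=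
  [("fever", (["high temperature", "temperature", "feverish"], "mild")),
   ("fatigue", (["tired", "weakness", "low energy", "exhausted"], "mild")),
   ("headache", (["head pain", "migraine", "pressure in head"], "mild")),
   ("chest pain", (["chest discomfort", "pressure in chest", "tight chest"], "severe")),
   ("breathing difficulty", (["shortness of breath", "difficulty breathing", "dyspnea"], "severe"))]

def pvNormalize (text : String) : String := PySem.Str.strip (PySem.Str.lower text)

def pvMatchPhrase (text phrase : String) : Bool :=
  PySem.Str.isIn phrase text || (PySem.Str.split₀ phrase).any (fun word => PySem.Str.isIn word text)

-- for loop with 'continue' / inner alias loop with 'break' → per-item branch in a foldl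
def pvDetectSymptoms (text : String) : List String :=
  let t := pvNormalize text
  PySem.Set.ofList (pvDB.foldl (fun acc e =>
    if pvMatchPhrase t e.1 then acc ++ [e.1]
    else if e.2.1.any (fun al => pvMatchPhrase t al) then acc ++ [e.1]
    else acc) [])

-- SYMPTOMS_DB[s]["severity"]; within A's use s is always a key (default "" is unreachable)
def pvSevOf (s : String) : String :=
  (((pvDB.find? (fun e => e.1 == s)).map (fun e => e.2.2)).getD "")

def get_overall_severity (text : String) : String :=
  let detected := pvDetectSymptoms text
  if detected = [] then "unknown"
  else if detected.any (fun s => pvSevOf s == "severe") then "severe"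
  else if detected.length ≥ 2 then "moderate"
  else "mild"

-- ===== PORT B =====
-- Source B carries its own copy of SYMPTOMS_DB with the identical literal; pvDB stands for it here.

-- _build_index(): idx[word] = idx.get(word, set()) | {symptom}
def pvKeywordIndex : PySem.Dict String (PySem.Set String) :=
  pvDB.foldl (fun idx e =>
    (e.1 :: e.2.1).foldl (fun idx ph =>
      (PySem.Str.split₀ ph).foldl (fun idx w =>
        idx.insert w (PySem.Set.union (idx.getD w PySem.Set.empty)
          (PySem.Set.ofList [e.1]))) idx) idx) PySem.Dict.empty

-- SEVERE_SYMPTOMS = {s for s, d in SYMPTOMS_DB.items() if d["severity"] == "severe"}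
def pvSevereSymptoms : PySem.Set String :=
  pvDB.foldl (fun s e => if e.2.2 == "severe" then PySem.Set.add s e.1 else s) PySem.Set.empty

def get_overall_severity_alt (text : String) : String :=
  let t := PySem.Str.strip (PySem.Str.lower text)
  let matched := pvKeywordIndex.items.foldl
    (fun m p => if PySem.Str.isIn p.1 t then PySem.Set.union m p.2 else m) PySem.Set.empty
  if matched = [] then "unknown"
  else if PySem.Set.inter matched pvSevereSymptoms ≠ [] then "severe"
  else if PySem.Set.len matched ≥ 2 then "moderate"
  else "mild"

-- ===== PRECONDITION & SPEC =====
def Spec_get_overall_severity (text : String) (out : String) : Prop := out = get_overall_severity_alt text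
instance (text : String) (out : String) : Decidable (Spec_get_overall_severity text out) := by unfold Spec_get_overall_severity; infer_instance

-- ===== CLAIM (what is proved, stated in full; the proofs are below) =====
def Claim_equal_get_overall_severity : Prop := ∀ (text : String), Dom_get_overall_severity text → Spec_get_overall_severity text (get_overall_severity text)

-- ===== LEMMAS AND PROOFS =====

-- per-symptom keyword disjunctions (the atoms both programs reduce to)
def pvD1 (t : String) : Bool := PySem.Str.isIn "fever" t || PySem.Str.isIn "high" t || PySem.Str.isIn "temperature" t || PySem.Str.isIn "feverish" t
def pvD2 (t : String) : Bool := PySem.Str.isIn "fatigue" t || PySem.Str.isIn "tired" t || PySem.Str.isIn "weakness" t || PySem.Str.isIn "low" t || PySem.Str.isIn "energy" t || PySem.Str.isIn "exhausted" t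
def pvD3 (t : String) : Bool := PySem.Str.isIn "headache" t || PySem.Str.isIn "head" t || PySem.Str.isIn "pain" t || PySem.Str.isIn "migraine" t || PySem.Str.isIn "pressure" t || PySem.Str.isIn "in" t
def pvD4 (t : String) : Bool := PySem.Str.isIn "chest" t || PySem.Str.isIn "pain" t || PySem.Str.isIn "discomfort" t || PySem.Str.isIn "pressure" t || PySem.Str.isIn "in" t || PySem.Str.isIn "tight" t
def pvD5 (t : String) : Bool := PySem.Str.isIn "breathing" t || PySem.Str.isIn "difficulty" t || PySem.Str.isIn "shortness" t || PySem.Str.isIn "of" t || PySem.Str.isIn "breath" t || PySem.Str.isIn "dyspnea" t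

def pvCls (b1 b2 b3 b4 b5 : Bool) : String :=
  if b1 || b2 || b3 || b4 || b5 then
    (if b4 || b5 then "severe"
     else if 2 ≤ (cond b1 1 0) + (cond b2 1 0) + (cond b3 1 0) + (cond b4 1 0) + (cond b5 1 0) then "moderate"
     else "mild")
  else "unknown"

-- a phrase all of whose words are its own substrings matches iff one of its words matches
theorem matchPhrase_eq_any (t p : String)
    (h : ∀ w ∈ PySem.Str.split₀ p, w.toList <:+: p.toList)
    (hne : PySem.Str.split₀ p ≠ []) :
    pvMatchPhrase t p = (PySem.Str.split₀ p).any (fun w => PySem.Str.isIn w t) := by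
  cases hp : PySem.Str.isIn p t
  · simp only [pvMatchPhrase, hp, Bool.false_or]
  · simp only [pvMatchPhrase, hp, Bool.true_or]
    obtain ⟨w, hw⟩ := List.exists_mem_of_ne_nil _ hne
    have hwin : PySem.Str.isIn w t = true := by
      rw [PySem.Str.isIn_iff_infix] at hp ⊢
      exact (h w hw).trans hp
    exact (List.any_eq_true.2 ⟨w, hw, hwin⟩).symm

def pvIdxL : List (String × PySem.Set String) :=
  [("fever", ["fever"]), ("high", ["fever"]), ("temperature", ["fever"]), ("feverish", ["fever"]),
   ("fatigue", ["fatigue"]), ("tired", ["fatigue"]), ("weakness", ["fatigue"]), ("low", ["fatigue"]),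
   ("energy", ["fatigue"]), ("exhausted", ["fatigue"]), ("headache", ["headache"]), ("head", ["headache"]),
   ("pain", ["headache", "chest pain"]), ("migraine", ["headache"]), ("pressure", ["headache", "chest pain"]),
   ("in", ["headache", "chest pain"]), ("chest", ["chest pain"]), ("discomfort", ["chest pain"]),
   ("tight", ["chest pain"]), ("breathing", ["breathing difficulty"]), ("difficulty", ["breathing difficulty"]),
   ("shortness", ["breathing difficulty"]), ("of", ["breathing difficulty"]), ("breath", ["breathing difficulty"]),
   ("dyspnea", ["breathing difficulty"])]
set_option maxRecDepth 4096 in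
theorem idx_eval : pvKeywordIndex.items = pvIdxL := by decide
theorem sev_eval : pvSevereSymptoms = ["chest pain", "breathing difficulty"] := by decide
def pvStep (t : String) : PySem.Set String → String × PySem.Set String → PySem.Set String :=
  fun m p => if PySem.Str.isIn p.1 t then PySem.Set.union m p.2 else m

theorem mem_foldl_step (t x : String) (l : List (String × PySem.Set String)) (m0 : PySem.Set String) :
    x ∈ l.foldl (pvStep t) m0 ↔ x ∈ m0 ∨ ∃ p ∈ l, PySem.Str.isIn p.1 t = true ∧ x ∈ p.2 := by
  induction l generalizing m0 with
  | nil => simp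
  | cons p l ih =>
    rw [List.foldl_cons, ih]
    cases hc : PySem.Str.isIn p.1 t <;>
      simp only [pvStep, hc, Bool.false_eq_true, if_false, if_true] <;>
      simp only [PySem.Str.isIn_eq] at hc <;>
      simp [hc, PySem.Set.mem_union, or_assoc]

theorem nodup_foldl_step (t : String) (l : List (String × PySem.Set String)) (m0 : PySem.Set String)
    (h : m0.Nodup) : (l.foldl (pvStep t) m0).Nodup := by
  induction l generalizing m0 with
  | nil => exact h
  | cons p l ih =>
    rw [List.foldl_cons]
    apply ih
    unfold pvStep
    split
    · exact PySem.Set.nodup_union _ _ h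
    · exact h
def pvMatched (t : String) : PySem.Set String :=
  pvKeywordIndex.items.foldl (pvStep t) PySem.Set.empty

theorem mem_matched_fever (t : String) : ("fever" ∈ pvMatched t) ↔ pvD1 t = true := by
  unfold pvMatched
  rw [idx_eval, mem_foldl_step]
  simp [pvIdxL, pvD1, or_assoc]
theorem mem_matched_fatigue (t : String) : ("fatigue" ∈ pvMatched t) ↔ pvD2 t = true := by
  unfold pvMatched
  rw [idx_eval, mem_foldl_step]
  simp [pvIdxL, pvD2, or_assoc]

theorem mem_matched_headache (t : String) : ("headache" ∈ pvMatched t) ↔ pvD3 t = true := by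
  unfold pvMatched
  rw [idx_eval, mem_foldl_step]
  simp [pvIdxL, pvD3, or_assoc]

theorem mem_matched_chest (t : String) : ("chest pain" ∈ pvMatched t) ↔ pvD4 t = true := by
  unfold pvMatched
  rw [idx_eval, mem_foldl_step]
  simp [pvIdxL, pvD4, or_assoc]
  tauto

theorem mem_matched_breathing (t : String) : ("breathing difficulty" ∈ pvMatched t) ↔ pvD5 t = true := by
  unfold pvMatched
  rw [idx_eval, mem_foldl_step]
  simp [pvIdxL, pvD5, or_assoc]

theorem mem_matched_names (t x : String) (hx : x ∈ pvMatched t) :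
    x = "fever" ∨ x = "fatigue" ∨ x = "headache" ∨ x = "chest pain" ∨ x = "breathing difficulty" := by
  unfold pvMatched at hx
  rw [idx_eval, mem_foldl_step] at hx
  simp [pvIdxL] at hx
  tauto
theorem nodup_matched (t : String) : (pvMatched t).Nodup :=
  nodup_foldl_step t _ _ List.nodup_nil

theorem matched_eq_nil_iff (t : String) :
    pvMatched t = [] ↔ (pvD1 t || pvD2 t || pvD3 t || pvD4 t || pvD5 t) = false := by
  constructor
  · intro h
    have h1 : pvD1 t = false := by
      cases hd : pvD1 t
      · rfl
      · have := (mem_matched_fever t).2 hd; rw [h] at this; simp at this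
    have h2 : pvD2 t = false := by
      cases hd : pvD2 t
      · rfl
      · have := (mem_matched_fatigue t).2 hd; rw [h] at this; simp at this
    have h3 : pvD3 t = false := by
      cases hd : pvD3 t
      · rfl
      · have := (mem_matched_headache t).2 hd; rw [h] at this; simp at this
    have h4 : pvD4 t = false := by
      cases hd : pvD4 t
      · rfl
      · have := (mem_matched_chest t).2 hd; rw [h] at this; simp at this
    have h5 : pvD5 t = false := by
      cases hd : pvD5 t
      · rfl
      · have := (mem_matched_breathing t).2 hd; rw [h] at this; simp at this
    simp [h1, h2, h3, h4, h5]
  · intro h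
    simp only [Bool.or_eq_false_iff] at h
    obtain ⟨⟨⟨⟨h1, h2⟩, h3⟩, h4⟩, h5⟩ := h
    rw [List.eq_nil_iff_forall_not_mem]
    intro x hx
    rcases mem_matched_names t x hx with rfl | rfl | rfl | rfl | rfl
    · rw [mem_matched_fever t, h1] at hx; simp at hx
    · rw [mem_matched_fatigue t, h2] at hx; simp at hx
    · rw [mem_matched_headache t, h3] at hx; simp at hx
    · rw [mem_matched_chest t, h4] at hx; simp at hx
    · rw [mem_matched_breathing t, h5] at hx; simp at hx

theorem inter_eq_nil_iff (t : String) :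
    PySem.Set.inter (pvMatched t) pvSevereSymptoms = [] ↔ (pvD4 t || pvD5 t) = false := by
  constructor
  · intro h
    have h4 : pvD4 t = false := by
      cases hd : pvD4 t
      · rfl
      · have hm := (mem_matched_chest t).2 hd
        have : ("chest pain" : String) ∈ PySem.Set.inter (pvMatched t) pvSevereSymptoms := by
          rw [PySem.Set.mem_inter]; exact ⟨hm, by rw [sev_eval]; simp⟩
        rw [h] at this; simp at this
    have h5 : pvD5 t = false := by
      cases hd : pvD5 t
      · rfl
      · have hm := (mem_matched_breathing t).2 hd
        have : ("breathing difficulty" : String) ∈ PySem.Set.inter (pvMatched t) pvSevereSymptoms := by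
          rw [PySem.Set.mem_inter]; exact ⟨hm, by rw [sev_eval]; simp⟩
        rw [h] at this; simp at this
    simp [h4, h5]
  · intro h
    simp only [Bool.or_eq_false_iff] at h
    obtain ⟨h4, h5⟩ := h
    rw [List.eq_nil_iff_forall_not_mem]
    intro x hx
    rw [PySem.Set.mem_inter, sev_eval] at hx
    obtain ⟨hm, hs⟩ := hx
    simp at hs
    rcases hs with rfl | rfl
    · rw [mem_matched_chest t, h4] at hm; simp at hm
    · rw [mem_matched_breathing t, h5] at hm; simp at hm

theorem length_eq_countP_names {l ns : List String} (hl : l.Nodup) (hns : ns.Nodup)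
    (hsub : ∀ x ∈ l, x ∈ ns) : l.length = ns.countP (fun n => decide (n ∈ l)) := by
  have hperm : l.Perm (ns.filter (fun n => decide (n ∈ l))) := by
    refine (List.perm_ext_iff_of_nodup hl (hns.filter _)).2 ?_
    intro a
    simp only [List.mem_filter, decide_eq_true_eq]
    exact ⟨fun h => ⟨hsub a h, h⟩, fun h => h.2⟩
  rw [hperm.length_eq, ← List.countP_eq_length_filter]

theorem matched_length (t : String) : (pvMatched t).length =
    (cond (pvD1 t) 1 0) + (cond (pvD2 t) 1 0) + (cond (pvD3 t) 1 0) +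
    (cond (pvD4 t) 1 0) + (cond (pvD5 t) 1 0) := by
  rw [length_eq_countP_names (nodup_matched t)
    (ns := ["fever", "fatigue", "headache", "chest pain", "breathing difficulty"]) (by decide)
    (fun x hx => by rcases mem_matched_names t x hx with rfl | rfl | rfl | rfl | rfl <;> simp)]
  simp only [List.countP_cons, List.countP_nil, mem_matched_fever, mem_matched_fatigue,
    mem_matched_headache, mem_matched_chest, mem_matched_breathing]
  cases pvD1 t <;> cases pvD2 t <;> cases pvD3 t <;> cases pvD4 t <;> cases pvD5 t <;> simp
theorem alt_eq_cls (text : String) :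
    get_overall_severity_alt text =
      pvCls (pvD1 (pvNormalize text)) (pvD2 (pvNormalize text)) (pvD3 (pvNormalize text))
        (pvD4 (pvNormalize text)) (pvD5 (pvNormalize text)) := by
  have hshape : get_overall_severity_alt text =
      (if pvMatched (pvNormalize text) = [] then "unknown"
       else if PySem.Set.inter (pvMatched (pvNormalize text)) pvSevereSymptoms ≠ [] then "severe"
       else if PySem.Set.len (pvMatched (pvNormalize text)) ≥ 2 then "moderate" else "mild") := rfl
  rw [hshape]
  have he := matched_eq_nil_iff (pvNormalize text)
  have hi := inter_eq_nil_iff (pvNormalize text)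
  have hl := matched_length (pvNormalize text)
  cases h1 : pvD1 (pvNormalize text) <;> cases h2 : pvD2 (pvNormalize text) <;>
    cases h3 : pvD3 (pvNormalize text) <;> cases h4 : pvD4 (pvNormalize text) <;>
    cases h5 : pvD5 (pvNormalize text) <;>
    simp_all [pvCls, PySem.Set.len]
theorem c1_eq (t : String) :
    (pvMatchPhrase t "fever" || (pvMatchPhrase t "high temperature" ||
      (pvMatchPhrase t "temperature" || pvMatchPhrase t "feverish"))) = pvD1 t := by
  rw [matchPhrase_eq_any t "fever" (by decide) (by decide),
      matchPhrase_eq_any t "high temperature" (by decide) (by decide),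
      matchPhrase_eq_any t "temperature" (by decide) (by decide),
      matchPhrase_eq_any t "feverish" (by decide) (by decide),
      show PySem.Str.split₀ "fever" = ["fever"] from by decide,
      show PySem.Str.split₀ "high temperature" = ["high", "temperature"] from by decide,
      show PySem.Str.split₀ "temperature" = ["temperature"] from by decide,
      show PySem.Str.split₀ "feverish" = ["feverish"] from by decide]
  simp only [List.any_cons, List.any_nil, Bool.or_false, pvD1]
  generalize PySem.Str.isIn "fever" t = a1
  generalize PySem.Str.isIn "high" t = a2
  generalize PySem.Str.isIn "temperature" t = a3
  generalize PySem.Str.isIn "feverish" t = a4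
  revert a1 a2 a3 a4
  decide
theorem c2_eq (t : String) :
    (pvMatchPhrase t "fatigue" || (pvMatchPhrase t "tired" || (pvMatchPhrase t "weakness" ||
      (pvMatchPhrase t "low energy" || pvMatchPhrase t "exhausted")))) = pvD2 t := by
  rw [matchPhrase_eq_any t "fatigue" (by decide) (by decide),
      matchPhrase_eq_any t "tired" (by decide) (by decide),
      matchPhrase_eq_any t "weakness" (by decide) (by decide),
      matchPhrase_eq_any t "low energy" (by decide) (by decide),
      matchPhrase_eq_any t "exhausted" (by decide) (by decide),
      show PySem.Str.split₀ "fatigue" = ["fatigue"] from by decide,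
      show PySem.Str.split₀ "tired" = ["tired"] from by decide,
      show PySem.Str.split₀ "weakness" = ["weakness"] from by decide,
      show PySem.Str.split₀ "low energy" = ["low", "energy"] from by decide,
      show PySem.Str.split₀ "exhausted" = ["exhausted"] from by decide]
  simp only [List.any_cons, List.any_nil, Bool.or_false, pvD2]
  generalize PySem.Str.isIn "fatigue" t = a1
  generalize PySem.Str.isIn "tired" t = a2
  generalize PySem.Str.isIn "weakness" t = a3
  generalize PySem.Str.isIn "low" t = a4
  generalize PySem.Str.isIn "energy" t = a5
  generalize PySem.Str.isIn "exhausted" t = a6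
  revert a1 a2 a3 a4 a5 a6
  decide

theorem c3_eq (t : String) :
    (pvMatchPhrase t "headache" || (pvMatchPhrase t "head pain" ||
      (pvMatchPhrase t "migraine" || pvMatchPhrase t "pressure in head"))) = pvD3 t := by
  rw [matchPhrase_eq_any t "headache" (by decide) (by decide),
      matchPhrase_eq_any t "head pain" (by decide) (by decide),
      matchPhrase_eq_any t "migraine" (by decide) (by decide),
      matchPhrase_eq_any t "pressure in head" (by decide) (by decide),
      show PySem.Str.split₀ "headache" = ["headache"] from by decide,
      show PySem.Str.split₀ "head pain" = ["head", "pain"] from by decide,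
      show PySem.Str.split₀ "migraine" = ["migraine"] from by decide,
      show PySem.Str.split₀ "pressure in head" = ["pressure", "in", "head"] from by decide]
  simp only [List.any_cons, List.any_nil, Bool.or_false, pvD3]
  generalize PySem.Str.isIn "headache" t = a1
  generalize PySem.Str.isIn "head" t = a2
  generalize PySem.Str.isIn "pain" t = a3
  generalize PySem.Str.isIn "migraine" t = a4
  generalize PySem.Str.isIn "pressure" t = a5
  generalize PySem.Str.isIn "in" t = a6
  revert a1 a2 a3 a4 a5 a6
  decide

theorem c4_eq (t : String) :
    (pvMatchPhrase t "chest pain" || (pvMatchPhrase t "chest discomfort" ||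
      (pvMatchPhrase t "pressure in chest" || pvMatchPhrase t "tight chest"))) = pvD4 t := by
  rw [matchPhrase_eq_any t "chest pain" (by decide) (by decide),
      matchPhrase_eq_any t "chest discomfort" (by decide) (by decide),
      matchPhrase_eq_any t "pressure in chest" (by decide) (by decide),
      matchPhrase_eq_any t "tight chest" (by decide) (by decide),
      show PySem.Str.split₀ "chest pain" = ["chest", "pain"] from by decide,
      show PySem.Str.split₀ "chest discomfort" = ["chest", "discomfort"] from by decide,
      show PySem.Str.split₀ "pressure in chest" = ["pressure", "in", "chest"] from by decide,
      show PySem.Str.split₀ "tight chest" = ["tight", "chest"] from by decide]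
  simp only [List.any_cons, List.any_nil, Bool.or_false, pvD4]
  generalize PySem.Str.isIn "chest" t = a1
  generalize PySem.Str.isIn "pain" t = a2
  generalize PySem.Str.isIn "discomfort" t = a3
  generalize PySem.Str.isIn "pressure" t = a4
  generalize PySem.Str.isIn "in" t = a5
  generalize PySem.Str.isIn "tight" t = a6
  revert a1 a2 a3 a4 a5 a6
  decide

theorem c5_eq (t : String) :
    (pvMatchPhrase t "breathing difficulty" || (pvMatchPhrase t "shortness of breath" ||
      (pvMatchPhrase t "difficulty breathing" || pvMatchPhrase t "dyspnea"))) = pvD5 t := by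
  rw [matchPhrase_eq_any t "breathing difficulty" (by decide) (by decide),
      matchPhrase_eq_any t "shortness of breath" (by decide) (by decide),
      matchPhrase_eq_any t "difficulty breathing" (by decide) (by decide),
      matchPhrase_eq_any t "dyspnea" (by decide) (by decide),
      show PySem.Str.split₀ "breathing difficulty" = ["breathing", "difficulty"] from by decide,
      show PySem.Str.split₀ "shortness of breath" = ["shortness", "of", "breath"] from by decide,
      show PySem.Str.split₀ "difficulty breathing" = ["difficulty", "breathing"] from by decide,
      show PySem.Str.split₀ "dyspnea" = ["dyspnea"] from by decide]
  simp only [List.any_cons, List.any_nil, Bool.or_false, pvD5]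
  generalize PySem.Str.isIn "breathing" t = a1
  generalize PySem.Str.isIn "difficulty" t = a2
  generalize PySem.Str.isIn "shortness" t = a3
  generalize PySem.Str.isIn "of" t = a4
  generalize PySem.Str.isIn "breath" t = a5
  generalize PySem.Str.isIn "dyspnea" t = a6
  revert a1 a2 a3 a4 a5 a6
  decide
theorem pv_if_or {α : Type} (p q : Bool) (x y : α) :
    (if p then x else if q then x else y) = (if p || q then x else y) := by
  cases p <;> simp

theorem a_eq_cls (text : String) :
    get_overall_severity text =
      pvCls (pvD1 (pvNormalize text)) (pvD2 (pvNormalize text)) (pvD3 (pvNormalize text))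
        (pvD4 (pvNormalize text)) (pvD5 (pvNormalize text)) := by
  simp only [get_overall_severity, pvDetectSymptoms, pvNormalize, pvDB, List.foldl,
    List.any_cons, List.any_nil, Bool.or_false, pv_if_or]
  rw [c1_eq (PySem.Str.strip (PySem.Str.lower text)), c2_eq (PySem.Str.strip (PySem.Str.lower text)),
      c3_eq (PySem.Str.strip (PySem.Str.lower text)), c4_eq (PySem.Str.strip (PySem.Str.lower text)),
      c5_eq (PySem.Str.strip (PySem.Str.lower text))]
  generalize pvD1 (PySem.Str.strip (PySem.Str.lower text)) = b1
  generalize pvD2 (PySem.Str.strip (PySem.Str.lower text)) = b2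
  generalize pvD3 (PySem.Str.strip (PySem.Str.lower text)) = b3
  generalize pvD4 (PySem.Str.strip (PySem.Str.lower text)) = b4
  generalize pvD5 (PySem.Str.strip (PySem.Str.lower text)) = b5
  revert b1 b2 b3 b4 b5
  decide

-- ===== VERDICT (by name: the statement is the Claim_ definition above) =====
theorem get_overall_severity_spec : Claim_equal_get_overall_severity := by
  intro text _
  unfold Spec_get_overall_severity
  rw [a_eq_cls, alt_eq_cls]
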